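-- pv_equiv track=rewrite | github.com/Xiaodx912/chika | chika.py | equip_list_trans
-- ===== SOURCE A (Python) =====
-- def equip_list_trans(equip_list):
--     equip_data = []
--     tmp = {}
--     rate = {113: 5, 123: 5, 114: 30, 124: 20, 115: 35, 125: 25, 116: 0, 126: 0}  # k:type+rarity v:whole-piece rate
--     equip_list.sort(key=lambda eq: eq['id'])
--     for equip in equip_list:
--         eq_type = int(equip['id'] / 1e4)  # 10-equip 11-fragment 12-blueprint 13-unique_equip 14-p_heart
--         rarity = int(equip['id'] / 1e3) % 10  # 0heart 1Blue 2Bronze 3Silver 4Gold 5Purple 6Red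
--         if eq_type == 13 or rarity in range(1, 3):
--             continue
--         sid = equip['id'] % 10000
--         count = equip['stock']
--         if eq_type == 10 or equip['id'] == 140000:
--             tmp[sid] = count
--         else:
--             if equip['id'] == 140001 and 0 in tmp.keys():
--                 count += tmp[0] * 10
--             if sid in tmp.keys():
--                 count += tmp[sid] * rate[eq_type * 10 + rarity]
--             data = {'c': hex(count)[2:], 'e': hex(equip['id'])[2:], 'a': str(int(count != 0))}
--             equip_data.append(data)
--     return equip_data
-- ===== SOURCE B (Python) =====
-- def equip_list_trans(equip_list):
--     # Same in-place sort (and thus the same argument mutation) as the original.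
--     rate = {113: 5, 123: 5, 114: 30, 124: 20, 115: 35, 125: 25, 116: 0, 126: 0}
--     equip_list.sort(key=lambda eq: eq['id'])
--     # Pass 1: partition the sorted list into the table-feeding items (whole
--     # equips / id 140000) and the record-emitting items, as plain tuples.
--     sources = []    # (id, sid, stock) in ascending id order
--     consumers = []  # (id, sid, stock, rate key) in ascending id order
--     for eq in equip_list:
--         i = eq['id']
--         eq_type = int(i / 1e4)
--         rarity = int(i / 1e3) % 10
--         if eq_type == 13 or rarity in (1, 2):
--             continue
--         if eq_type == 10 or i == 140000:
--             sources.append((i, i % 10000, eq['stock']))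
--         else:
--             consumers.append((i, i % 10000, eq['stock'], eq_type * 10 + rarity))
--     # Pass 2: merge the two id-sorted streams with two pointers, feeding the
--     # lookup table only with sources of strictly smaller id before each emit.
--     table = {}
--     j = 0
--     out = []
--     for i, sid, count, key in consumers:
--         while j < len(sources) and sources[j][0] < i:
--             table[sources[j][1]] = sources[j][2]
--             j += 1
--         if i == 140001 and 0 in table:
--             count += table[0] * 10
--         if sid in table:
--             count += table[sid] * rate[key]
--         out.append({'c': hex(count)[2:], 'e': hex(i)[2:], 'a': str(int(count != 0))})
--     return out
-- ===== Notes on version B (the rewrite author's own statement) =====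
-- stated objective: alternative
-- what changed: A's single fused pass over the sorted list (a dict built and consulted in the same loop) is replaced by a partition of the sorted items into an id-ordered source stream and an id-ordered consumer stream, followed by a two-pointer merge that feeds the lookup table only with sources of strictly smaller id before each emitted record.
import Mathlib
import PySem

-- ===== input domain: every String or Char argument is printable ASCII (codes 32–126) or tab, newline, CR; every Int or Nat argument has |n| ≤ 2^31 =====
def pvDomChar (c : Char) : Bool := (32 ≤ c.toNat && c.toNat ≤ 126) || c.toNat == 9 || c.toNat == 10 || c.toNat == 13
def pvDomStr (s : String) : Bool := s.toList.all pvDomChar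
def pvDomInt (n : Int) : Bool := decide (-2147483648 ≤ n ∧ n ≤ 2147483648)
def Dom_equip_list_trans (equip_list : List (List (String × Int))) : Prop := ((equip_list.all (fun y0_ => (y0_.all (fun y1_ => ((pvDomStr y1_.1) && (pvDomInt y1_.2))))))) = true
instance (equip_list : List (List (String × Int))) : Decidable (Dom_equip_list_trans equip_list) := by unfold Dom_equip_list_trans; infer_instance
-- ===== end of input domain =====

-- B replaces A's single fused sort-then-accumulate loop (dict built and consulted in the
-- same pass) by sort, a partition of the items into an id-sorted source stream and an
-- id-sorted consumer stream, and a two-pointer merge of the two streams; objective: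
-- alternative decomposition, same cost. Both A and B sort the argument list in place
-- (same observable mutation); the equivalence proved here is about the return value.

-- ----- helpers shared by both ports (code that is literally identical in Source A and Source B) -----

-- eq['k'] on the association list: first matching key
def pvLook (k : String) (eq : List (String × Int)) : Option Int :=
  (eq.find? (fun p => p.1 == k)).map Prod.snd

-- eq['id'] / eq['stock']; Pre_ guarantees the key is present wherever the Python reads it,
-- so the default 0 is never observed on admitted inputs
def pvGetId (eq : List (String × Int)) : Int := (pvLook "id" eq).getD 0
def pvGetStock (eq : List (String × Int)) : Int := (pvLook "stock" eq).getD 0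

-- the literal `rate` table of both sources
def pvRate : PySem.Dict Int Int :=
  PySem.Dict.ofList [(113, 5), (123, 5), (114, 30), (124, 20), (115, 35), (125, 25), (116, 0), (126, 0)]

-- lowercase hex digits of n (empty for 0), exact for hex(n)
def pvHexDigits : Nat → List Char
  | 0 => []
  | n + 1 => pvHexDigits ((n + 1) / 16) ++ [Nat.digitChar ((n + 1) % 16)]
decreasing_by exact Nat.div_lt_self (Nat.succ_pos n) (by omega)

-- hex(i)[2:] : for i ≥ 0 the digits ('0' for 0); for i < 0, hex gives '-0x…' so [2:] is 'x…'
def pvHex (i : Int) : String :=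
  if i < 0 then String.mk ('x' :: pvHexDigits (-i).toNat)
  else if i = 0 then "0" else String.mk (pvHexDigits i.toNat)

-- {'c': hex(count)[2:], 'e': hex(id)[2:], 'a': str(int(count != 0))} — identical line in both sources
def pvRecord (count i : Int) : List (String × String) :=
  [("c", pvHex count), ("e", pvHex i), ("a", if count = 0 then "0" else "1")]

-- ===== PORT A =====
-- one fused pass over the sorted list, state = (tmp dict, output list), exactly Source A's loop body.
-- int(i / 1e4) and int(i / 1e3) are exact truncated division for |i| ≤ 2^31 (the fractional
-- part of the exact quotient is 0 or ≥ 1e-4, far above the double rounding error): Int.tdiv.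
def pvStepA (st : PySem.Dict Int Int × List (List (String × String))) (equip : List (String × Int)) :
    PySem.Dict Int Int × List (List (String × String)) :=
  let i := pvGetId equip
  let eq_type := i.tdiv 10000
  let rarity := PySem.Int.mod (i.tdiv 1000) 10
  if eq_type = 13 ∨ rarity = 1 ∨ rarity = 2 then st
  else
    let sid := PySem.Int.mod i 10000
    let count := pvGetStock equip
    if eq_type = 10 ∨ i = 140000 then (st.1.insert sid count, st.2)
    else
      -- rate[eq_type*10+rarity]: Pre_ guarantees the key is present whenever this branch reads it
      let count := if i = 140001 ∧ st.1.contains 0 = true then count + st.1.getD 0 0 * 10 else count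
      let count := if st.1.contains sid = true then count + st.1.getD sid 0 * pvRate.getD (eq_type * 10 + rarity) 0 else count
      (st.1, st.2 ++ [pvRecord count i])

def equip_list_trans (equip_list : List (List (String × Int))) : List (List (String × String)) :=
  (((PySem.List.sorted equip_list (fun eq => pvGetId eq)).foldl pvStepA
      ((PySem.Dict.empty : PySem.Dict Int Int), []))).2

-- ===== PORT B =====
-- pass 1 (Source B's first loop body): partition into (sources, consumers) tuple streams
def pvStepP (st : List (Int × Int × Int) × List (Int × Int × Int × Int)) (eq : List (String × Int)) :
    List (Int × Int × Int) × List (Int × Int × Int × Int) :=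
  let i := pvGetId eq
  let eq_type := i.tdiv 10000
  let rarity := PySem.Int.mod (i.tdiv 1000) 10
  if eq_type = 13 ∨ rarity = 1 ∨ rarity = 2 then st
  else if eq_type = 10 ∨ i = 140000 then
    (st.1 ++ [(i, PySem.Int.mod i 10000, pvGetStock eq)], st.2)
  else
    (st.1, st.2 ++ [(i, PySem.Int.mod i 10000, pvGetStock eq, eq_type * 10 + rarity)])

-- Source B's while loop: feed the table with sources of id strictly below i
def pvAdvance (table : PySem.Dict Int Int) (sources : List (Int × Int × Int)) (i : Int) :
    PySem.Dict Int Int × List (Int × Int × Int) :=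
  match sources with
  | [] => (table, [])
  | s :: rest => if s.1 < i then pvAdvance (table.insert s.2.1 s.2.2) rest i else (table, s :: rest)

-- pass 2 (Source B's second loop): emit one record per consumer, merging in the sources
def pvEmit (consumers : List (Int × Int × Int × Int)) (table : PySem.Dict Int Int)
    (sources : List (Int × Int × Int)) : List (List (String × String)) :=
  match consumers with
  | [] => []
  | c :: cs =>
    let p := pvAdvance table sources c.1
    let count := if c.1 = 140001 ∧ p.1.contains 0 = true then c.2.2.1 + p.1.getD 0 0 * 10 else c.2.2.1
    let count := if p.1.contains c.2.1 = true then count + p.1.getD c.2.1 0 * pvRate.getD c.2.2.2 0 else count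
    pvRecord count c.1 :: pvEmit cs p.1 p.2

def equip_list_trans_alt (equip_list : List (List (String × Int))) : List (List (String × String)) :=
  let part := (PySem.List.sorted equip_list (fun eq => pvGetId eq)).foldl pvStepP ([], [])
  pvEmit part.2 (PySem.Dict.empty : PySem.Dict Int Int) part.1

-- ===== PRECONDITION & SPEC =====
-- Python A raises KeyError (and only then fails to return) when an item lacks 'id' (read by the
-- sort key), a non-skipped item lacks 'stock', or a record-emitting item whose sid was stocked
-- by a lower-id table item has a type/rarity combination outside the `rate` table; Pre_ is
-- exactly the complement of those three crash conditions.
def pvSkipB (i : Int) : Bool :=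
  i.tdiv 10000 == 13 || PySem.Int.mod (i.tdiv 1000) 10 == 1 || PySem.Int.mod (i.tdiv 1000) 10 == 2
def pvSrcB (i : Int) : Bool := i.tdiv 10000 == 10 || i == 140000

def Pre_equip_list_trans (equip_list : List (List (String × Int))) : Prop :=
  (equip_list.all fun eq => (pvLook "id" eq).isSome) = true ∧
  (equip_list.all fun eq =>
    let i := pvGetId eq
    pvSkipB i ||
      ((pvLook "stock" eq).isSome &&
        (pvSrcB i ||
         !(equip_list.any fun eq' =>
             let j := pvGetId eq'
             pvSrcB j && !pvSkipB j && decide (j < i) &&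
               (PySem.Int.mod j 10000 == PySem.Int.mod i 10000)) ||
         pvRate.contains (i.tdiv 10000 * 10 + PySem.Int.mod (i.tdiv 1000) 10)))) = true

instance (equip_list : List (List (String × Int))) : Decidable (Pre_equip_list_trans equip_list) := by
  unfold Pre_equip_list_trans; infer_instance

def pvWitness_equip_list_trans : (List (List (String × Int))) :=
  [[("id", 110001), ("stock", 3)], [("id", 100004), ("stock", 2)], [("id", 115004), ("stock", 9)]]

def Spec_equip_list_trans (equip_list : List (List (String × Int))) (out : List (List (String × String))) : Prop := out = equip_list_trans_alt equip_list
instance (equip_list : List (List (String × Int))) (out : List (List (String × String))) : Decidable (Spec_equip_list_trans equip_list out) := by unfold Spec_equip_list_trans; infer_instance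

-- ===== CLAIM (what is proved, stated in full; the proofs are below) =====
def Claim_equal_equip_list_trans : Prop := ∀ (equip_list : List (List (String × Int))), Dom_equip_list_trans equip_list → Pre_equip_list_trans equip_list → Spec_equip_list_trans equip_list (equip_list_trans equip_list)

-- ===== LEMMAS AND PROOFS =====

-- the two streams pass 1 produces, as filterMaps (same branch conditions as the ports)
def pvSrcList (L : List (List (String × Int))) : List (Int × Int × Int) :=
  L.filterMap fun eq =>
    let i := pvGetId eq
    if i.tdiv 10000 = 13 ∨ PySem.Int.mod (i.tdiv 1000) 10 = 1 ∨ PySem.Int.mod (i.tdiv 1000) 10 = 2 then none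
    else if i.tdiv 10000 = 10 ∨ i = 140000 then some (i, PySem.Int.mod i 10000, pvGetStock eq)
    else none

def pvConList (L : List (List (String × Int))) : List (Int × Int × Int × Int) :=
  L.filterMap fun eq =>
    let i := pvGetId eq
    if i.tdiv 10000 = 13 ∨ PySem.Int.mod (i.tdiv 1000) 10 = 1 ∨ PySem.Int.mod (i.tdiv 1000) 10 = 2 then none
    else if i.tdiv 10000 = 10 ∨ i = 140000 then none
    else some (i, PySem.Int.mod i 10000, pvGetStock eq, i.tdiv 10000 * 10 + PySem.Int.mod (i.tdiv 1000) 10)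

theorem pvEmit_cons (c : Int × Int × Int × Int) (cs : List (Int × Int × Int × Int))
    (table : PySem.Dict Int Int) (sources : List (Int × Int × Int)) :
    pvEmit (c :: cs) table sources =
      (let p := pvAdvance table sources c.1
       let count := if c.1 = 140001 ∧ p.1.contains 0 = true then c.2.2.1 + p.1.getD 0 0 * 10 else c.2.2.1
       let count := if p.1.contains c.2.1 = true then count + p.1.getD c.2.1 0 * pvRate.getD c.2.2.2 0 else count
       pvRecord count c.1 :: pvEmit cs p.1 p.2) := rfl

theorem pvStepP_spec (L : List (List (String × Int))) :
    ∀ S C, L.foldl pvStepP (S, C) = (S ++ pvSrcList L, C ++ pvConList L) := by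
  induction L with
  | nil => intro S C; simp [pvSrcList, pvConList]
  | cons x t ih =>
    intro S C
    simp only [List.foldl_cons]
    by_cases h1 : (pvGetId x).tdiv 10000 = 13 ∨ (pvGetId x).tdiv 1000 % 10 = 1 ∨
        (pvGetId x).tdiv 1000 % 10 = 2
    · have hP : pvStepP (S, C) x = (S, C) := by simp [pvStepP, h1]
      rw [hP, ih]
      simp [pvSrcList, pvConList, h1]
    · by_cases h2 : (pvGetId x).tdiv 10000 = 10 ∨ pvGetId x = 140000
      · have hP : pvStepP (S, C) x = (S ++ [(pvGetId x, pvGetId x % 10000, pvGetStock x)], C) := by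
          simp [pvStepP, h1, h2]
        rw [hP, ih]
        simp [pvSrcList, pvConList, h1, h2]
      · have hP : pvStepP (S, C) x = (S, C ++ [(pvGetId x, pvGetId x % 10000, pvGetStock x,
            (pvGetId x).tdiv 10000 * 10 + (pvGetId x).tdiv 1000 % 10)]) := by
          simp [pvStepP, h1, h2]
        rw [hP, ih]
        simp [pvSrcList, pvConList, h1, h2]

theorem pvAdvance_cons (table : PySem.Dict Int Int) (s : Int × Int × Int)
    (rest : List (Int × Int × Int)) (i : Int) :
    pvAdvance table (s :: rest) i =
      if s.1 < i then pvAdvance (table.insert s.2.1 s.2.2) rest i else (table, s :: rest) := rfl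

theorem pvAdvance_stop (table : PySem.Dict Int Int) (S : List (Int × Int × Int)) (i : Int)
    (h : ∀ s ∈ S, ¬(s.1 < i)) : pvAdvance table S i = (table, S) := by
  cases S with
  | nil => rfl
  | cons s rest => rw [pvAdvance_cons, if_neg (h s (by simp))]

theorem pvEmit_insert (C : List (Int × Int × Int × Int)) (table : PySem.Dict Int Int)
    (x : Int × Int × Int) (S : List (Int × Int × Int))
    (h : ∀ c ∈ C, x.1 < c.1) :
    pvEmit C table (x :: S) = pvEmit C (table.insert x.2.1 x.2.2) S := by
  cases C with
  | nil => rfl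
  | cons c cs =>
    have hx : x.1 < c.1 := h c (by simp)
    rw [pvEmit_cons, pvEmit_cons]
    rw [pvAdvance_cons, if_pos hx]

-- source ids and consumer ids never coincide (the classification is a function of the id)
theorem pvClass_ne {a b : Int}
    (ha : a.tdiv 10000 = 10 ∨ a = 140000)
    (hb : ¬(b.tdiv 10000 = 10 ∨ b = 140000)) : a ≠ b := by
  intro h; exact hb (h ▸ ha)

theorem pvConList_mem {c : Int × Int × Int × Int} {L : List (List (String × Int))}
    (h : c ∈ pvConList L) :
    (∃ eq ∈ L, c.1 = pvGetId eq) ∧ ¬(c.1.tdiv 10000 = 10 ∨ c.1 = 140000) := by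
  simp only [pvConList, List.mem_filterMap] at h
  obtain ⟨eq, heq, hsome⟩ := h
  split_ifs at hsome with h1 h2
  all_goals cases hsome
  exact ⟨⟨eq, heq, rfl⟩, h2⟩

theorem pvSrcList_mem {s : Int × Int × Int} {L : List (List (String × Int))}
    (h : s ∈ pvSrcList L) : ∃ eq ∈ L, s.1 = pvGetId eq := by
  simp only [pvSrcList, List.mem_filterMap] at h
  obtain ⟨eq, heq, hsome⟩ := h
  split_ifs at hsome with h1 h2
  all_goals cases hsome
  exact ⟨eq, heq, rfl⟩

-- main invariant: A's fused fold over an id-sorted list equals B's merge of the two streams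
theorem pvMain (L : List (List (String × Int)))
    (hs : L.Pairwise (fun a b => pvGetId a ≤ pvGetId b)) :
    ∀ (tmp : PySem.Dict Int Int) (out : List (List (String × String))),
      (L.foldl pvStepA (tmp, out)).2 = out ++ pvEmit (pvConList L) tmp (pvSrcList L) := by
  induction L with
  | nil => intro tmp out; simp [pvConList, pvSrcList, pvEmit]
  | cons x t ih =>
    rw [List.pairwise_cons] at hs
    obtain ⟨hx, ht⟩ := hs
    intro tmp out
    simp only [List.foldl_cons]
    by_cases h1 : (pvGetId x).tdiv 10000 = 13 ∨ (pvGetId x).tdiv 1000 % 10 = 1 ∨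
        (pvGetId x).tdiv 1000 % 10 = 2
    · have hA : pvStepA (tmp, out) x = (tmp, out) := by simp [pvStepA, h1]
      have hC : pvConList (x :: t) = pvConList t := by simp [pvConList, h1]
      have hS : pvSrcList (x :: t) = pvSrcList t := by simp [pvSrcList, h1]
      rw [hA, hC, hS]; exact ih ht tmp out
    · by_cases h2 : (pvGetId x).tdiv 10000 = 10 ∨ pvGetId x = 140000
      · -- source item: A inserts into tmp; B prepends it to the source stream
        have hA : pvStepA (tmp, out) x =
            (tmp.insert (pvGetId x % 10000) (pvGetStock x), out) := by
          simp [pvStepA, h1, h2]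
        have hC : pvConList (x :: t) = pvConList t := by
          simp [pvConList, h1, h2]
        have hS : pvSrcList (x :: t) =
            (pvGetId x, pvGetId x % 10000, pvGetStock x) :: pvSrcList t := by
          simp [pvSrcList, h1, h2]
        have hlt : ∀ c ∈ pvConList t,
            ((pvGetId x, pvGetId x % 10000, pvGetStock x) : Int × Int × Int).1 < c.1 := by
          intro c hc
          obtain ⟨⟨eq, heq, hceq⟩, hnc⟩ := pvConList_mem hc
          exact lt_of_le_of_ne (hceq ▸ hx eq heq) (pvClass_ne h2 hnc)
        rw [hA, hC, hS, pvEmit_insert _ _ _ _ hlt]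
        exact ih ht _ out
      · -- consumer item: A emits a record from tmp; B has it at the head of the consumer stream
        have hge : ∀ s ∈ pvSrcList t, ¬(s.1 < pvGetId x) := by
          intro s hsmem
          obtain ⟨eq, heq, hseq⟩ := pvSrcList_mem hsmem
          exact not_lt.mpr (hseq ▸ hx eq heq)
        have hC : pvConList (x :: t) =
            (pvGetId x, pvGetId x % 10000, pvGetStock x,
              (pvGetId x).tdiv 10000 * 10 + (pvGetId x).tdiv 1000 % 10) :: pvConList t := by
          simp [pvConList, h1, h2]
        have hS : pvSrcList (x :: t) = pvSrcList t := by
          simp [pvSrcList, h1, h2]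
        rw [hC, hS, pvEmit_cons, pvAdvance_stop tmp _ _ hge]
        have hA : pvStepA (tmp, out) x = (tmp, out ++
            [pvRecord (if tmp.contains (pvGetId x % 10000) = true then
                  (if pvGetId x = 140001 ∧ tmp.contains 0 = true then
                      pvGetStock x + tmp.getD 0 0 * 10 else pvGetStock x) +
                    tmp.getD (pvGetId x % 10000) 0 *
                      pvRate.getD ((pvGetId x).tdiv 10000 * 10 + (pvGetId x).tdiv 1000 % 10) 0
                else (if pvGetId x = 140001 ∧ tmp.contains 0 = true then
                      pvGetStock x + tmp.getD 0 0 * 10 else pvGetStock x)) (pvGetId x)]) := by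
          simp [pvStepA, h1, h2]
        rw [hA, ih ht tmp _]
        simp [List.append_assoc]

-- ===== VERDICT (by name: the statement is the Claim_ definition above) =====
theorem equip_list_trans_spec : Claim_equal_equip_list_trans := by
  intro L _ _
  unfold Spec_equip_list_trans equip_list_trans equip_list_trans_alt
  rw [pvStepP_spec]
  rw [pvMain _ (PySem.List.sorted_pairwise L (fun eq => pvGetId eq))]
  simp
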